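-- pv_equiv track=rewrite | github.com/mikel-brostrom/boxmot | boxmot/engine/evaluator.py | _match_header_class_name
-- ===== SOURCE A (Python) =====
-- from typing import Optional, List, Dict, Generator, Union
--
-- def _match_header_class_name(raw_name: str, known_classes: Optional[list[str]] = None) -> str:
--     """Resolve a TrackEval header suffix to a class name, preserving hyphenated names."""
--     if known_classes:
--         exact_matches = [name for name in known_classes if raw_name.endswith(name)]
--         if exact_matches:
--             return max(exact_matches, key=len)
--
--         normalized = raw_name.lower()
--         folded_matches = [name for name in known_classes if normalized.endswith(name.lower())]
--         if folded_matches: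
--             return max(folded_matches, key=len)
--
--     if "-" in raw_name:
--         return raw_name.split("-")[-1]
--     return raw_name or "default"
-- ===== SOURCE B (Python) =====
-- def _match_header_class_name(raw_name, known_classes=None):
--     """Scan candidate suffixes of raw_name from longest to shortest, instead of
--     filtering known_classes and taking the max by length."""
--     classes = known_classes or []
--     found = _longest_suffix_class(raw_name, classes, lambda name: name)
--     if found is None:
--         normalized = raw_name.lower()
--         found = _longest_suffix_class(normalized, classes, lambda name: name.lower())
--     if found is not None:
--         return found
--     if "-" in raw_name:
--         return raw_name.split("-")[-1]
--     return raw_name or "default"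
--
--
-- def _longest_suffix_class(target, classes, key):
--     """First class (in list order) whose key equals the longest matching suffix of
--     target; only suffix lengths that occur among the class names can match."""
--     lengths = sorted({len(name) for name in classes if len(name) <= len(target)},
--                      reverse=True)
--     for k in lengths:
--         sfx = target[len(target) - k:]
--         for name in classes:
--             if key(name) == sfx:
--                 return name
--     return None
-- ===== Notes on version B (the rewrite author's own statement) =====
-- stated objective: alternative
-- what changed: Instead of filtering known_classes by endswith and taking max(key=len) (twice), B enumerates candidate suffix lengths of raw_name (the distinct class-name lengths, sorted descending) and returns the first class whose key (identity, then lower-cased) equals that suffix, sharing one helper for both phases.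
import Mathlib
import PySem

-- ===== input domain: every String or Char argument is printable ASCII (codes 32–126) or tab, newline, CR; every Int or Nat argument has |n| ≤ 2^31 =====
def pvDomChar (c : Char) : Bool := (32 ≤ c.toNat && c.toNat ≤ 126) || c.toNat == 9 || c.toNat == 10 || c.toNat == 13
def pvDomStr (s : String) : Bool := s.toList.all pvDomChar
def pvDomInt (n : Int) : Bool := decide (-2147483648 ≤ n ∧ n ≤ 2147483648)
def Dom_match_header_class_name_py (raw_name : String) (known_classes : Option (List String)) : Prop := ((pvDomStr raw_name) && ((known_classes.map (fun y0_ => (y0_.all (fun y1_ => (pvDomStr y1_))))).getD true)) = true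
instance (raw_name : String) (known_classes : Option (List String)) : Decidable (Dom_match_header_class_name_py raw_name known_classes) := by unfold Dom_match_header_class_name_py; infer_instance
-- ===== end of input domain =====

-- B replaces A's filter-then-max(key=len) passes by enumerating candidate suffixes of
-- raw_name from longest to shortest and taking the first class matching that suffix
-- (alternative decomposition, same cost).


-- ===== PORT A =====
-- the tail both Pythons share verbatim:
-- `if "-" in raw_name: return raw_name.split("-")[-1]; return raw_name or "default"`
def pvFallback (raw_name : String) : String :=
  if PySem.Str.isIn "-" raw_name then
    (PySem.List.pyGet? ((PySem.Str.split? raw_name "-").getD []) (-1)).getD ""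
  else if raw_name == "" then "default" else raw_name

def match_header_class_name_py (raw_name : String) (known_classes : Option (List String)) : String :=
  match known_classes with
  | none => pvFallback raw_name
  | some kcs =>
    if kcs.isEmpty then pvFallback raw_name
    else
      let exact_matches := kcs.filter (fun name => PySem.Str.endswith raw_name name)
      if !exact_matches.isEmpty then
        (PySem.List.max? exact_matches (fun n => PySem.Str.len n)).getD ""
      else
        let normalized := PySem.Str.lower raw_name
        let folded_matches := kcs.filter (fun name => PySem.Str.endswith normalized (PySem.Str.lower name))
        if !folded_matches.isEmpty then
          (PySem.List.max? folded_matches (fun n => PySem.Str.len n)).getD ""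
        else pvFallback raw_name

-- ===== PORT B =====
-- `sorted({len(name) for name in classes if len(name) <= len(target)}, reverse=True)`
def pvLengths (L : Nat) (classes : List String) : List Nat :=
  PySem.List.sorted
    (PySem.Set.ofList ((classes.filter (fun nm => nm.toList.length ≤ L)).map
      (fun nm => nm.toList.length)))
    (fun k => k) true

-- the `for k in lengths` loop of _longest_suffix_class;
-- the inner `for name in classes: if key(name) == sfx: return name` is List.find?
def pvScan (t : List Char) (classes : List String) (key : String → List Char) :
    List Nat → Option String
  | [] => none
  | k :: rest =>
    match classes.find? (fun nm => key nm == t.drop (t.length - k)) with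
    | some m => some m
    | none => pvScan t classes key rest

def pvLongestSuffixClass (t : List Char) (classes : List String) (key : String → List Char) :
    Option String :=
  pvScan t classes key (pvLengths t.length classes)

def match_header_class_name_py_alt (raw_name : String) (known_classes : Option (List String)) : String :=
  let classes := known_classes.getD []
  let found0 := pvLongestSuffixClass raw_name.toList classes (fun nm => nm.toList)
  let found :=
    match found0 with
    | some m => some m
    | none =>
      pvLongestSuffixClass (PySem.Chars.lower raw_name.toList) classes
        (fun nm => PySem.Chars.lower nm.toList)
  match found with
  | some m => m
  | none => pvFallback raw_name

-- ===== PRECONDITION & SPEC =====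
def Spec_match_header_class_name_py (raw_name : String) (known_classes : Option (List String)) (out : String) : Prop := out = match_header_class_name_py_alt raw_name known_classes
instance (raw_name : String) (known_classes : Option (List String)) (out : String) : Decidable (Spec_match_header_class_name_py raw_name known_classes out) := by unfold Spec_match_header_class_name_py; infer_instance

-- ===== CLAIM (what is proved, stated in full; the proofs are below) =====
def Claim_equal_match_header_class_name_py : Prop := ∀ (raw_name : String) (known_classes : Option (List String)), Dom_match_header_class_name_py raw_name known_classes → Spec_match_header_class_name_py raw_name known_classes (match_header_class_name_py raw_name known_classes)

-- ===== LEMMAS AND PROOFS =====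

theorem pv_find?_congr {α : Type} (l : List α) (p q : α → Bool)
    (h : ∀ a ∈ l, p a = q a) : l.find? p = l.find? q := by
  induction l with
  | nil => rfl
  | cons x xs ih =>
    have hx := h x (List.mem_cons_self)
    simp only [List.find?_cons, hx]
    cases q x
    · exact ih (fun a ha => h a (List.mem_cons_of_mem _ ha))
    · rfl

-- the foldl behind max? started from `some a` merges with the none-start fold
theorem pv_max_foldl_some {α : Type} (key : α → Int) (l : List α) (a : α) :
    l.foldl (fun acc x => match acc with
      | none => some x
      | some m => if key m < key x then some x else some m) (some a)
    = some (match PySem.List.max? l key with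
      | none => a
      | some b => if key a < key b then b else a) := by
  induction l generalizing a with
  | nil => simp [PySem.List.max?]
  | cons y l ih =>
    simp only [List.foldl_cons]
    have hmy : PySem.List.max? (y :: l) key
        = l.foldl (fun acc x => match acc with
            | none => some x
            | some m => if key m < key x then some x else some m) (some y) := rfl
    rw [hmy, ih y]
    split_ifs with h1
    · rw [ih y]
      rcases hml : PySem.List.max? l key with _ | b <;> dsimp only <;>
        split_ifs <;> first | rfl | (exfalso; omega)
    · rw [ih a]
      rcases hml : PySem.List.max? l key with _ | b <;> dsimp only <;>
        split_ifs <;> first | rfl | (exfalso; omega)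

theorem pv_max?_eq_find? {α : Type} (key : α → Int) (l : List α) (m : α)
    (h : PySem.List.max? l key = some m) :
    l.find? (fun x => decide (key m ≤ key x)) = some m := by
  induction l with
  | nil => simp [PySem.List.max?] at h
  | cons x l ih =>
    have hx : PySem.List.max? (x :: l) key
        = l.foldl (fun acc x => match acc with
            | none => some x
            | some mm => if key mm < key x then some x else some mm) (some x) := rfl
    rw [hx, pv_max_foldl_some] at h
    injection h with h
    rcases hl : PySem.List.max? l key with _ | b
    · rw [hl] at h
      dsimp only at h
      subst h
      simp
    · rw [hl] at h
      dsimp only at h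
      by_cases hc : key x < key b
      · rw [if_pos hc] at h
        subst h
        rw [List.find?_cons_of_neg (by simp; omega)]
        exact ih hl
      · rw [if_neg hc] at h
        subst h
        rw [List.find?_cons_of_pos (by simp)]

-- if no candidate level has a hit, the scan returns none
theorem pv_scan_none (t : List Char) (classes : List String) (key : String → List Char)
    (ls : List Nat)
    (h : ∀ j ∈ ls, classes.find? (fun nm => key nm == t.drop (t.length - j)) = none) :
    pvScan t classes key ls = none := by
  induction ls with
  | nil => rfl
  | cons k rest ih =>
    have hk := h k (List.mem_cons_self)
    simp only [pvScan, hk]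
    exact ih (fun j hj => h j (List.mem_cons_of_mem _ hj))

-- if level km hits m, km is a candidate, and every larger candidate misses,
-- the scan over a descending candidate list returns m
theorem pv_scan_found (t : List Char) (classes : List String) (key : String → List Char)
    (km : Nat) {m : String}
    (hm : classes.find? (fun nm => key nm == t.drop (t.length - km)) = some m) :
    ∀ ls : List Nat, ls.Pairwise (fun a b => b ≤ a) → km ∈ ls →
      (∀ j ∈ ls, km < j → classes.find? (fun nm => key nm == t.drop (t.length - j)) = none) →
      pvScan t classes key ls = some m := by
  intro ls
  induction ls with
  | nil => intro _ hmem _; simp at hmem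
  | cons k rest ih =>
    intro hpair hmem hnone
    rcases List.pairwise_cons.1 hpair with ⟨hhead, hrest⟩
    by_cases he : km = k
    · subst he
      simp only [pvScan, hm]
    · have hmem' : km ∈ rest := by
        rcases List.mem_cons.1 hmem with h | h
        · exact absurd h he
        · exact h
      have hlt : km < k := Nat.lt_of_le_of_ne (hhead km hmem') he
      have hk : classes.find? (fun nm => key nm == t.drop (t.length - k)) = none :=
        hnone k (List.mem_cons_self) hlt
      simp only [pvScan, hk]
      exact ih hrest hmem' (fun j hj => hnone j (List.mem_cons_of_mem _ hj))

-- a candidate level is exactly an occurring class-name length ≤ |t|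
theorem pv_mem_pvLengths (L : Nat) (classes : List String) (j : Nat) :
    j ∈ pvLengths L classes ↔ (∃ nm ∈ classes, nm.toList.length = j) ∧ j ≤ L := by
  unfold pvLengths
  rw [PySem.List.mem_sorted, PySem.Set.mem_ofList]
  simp only [List.mem_map, List.mem_filter, decide_eq_true_eq]
  constructor
  · rintro ⟨nm, ⟨hnm, hle⟩, hj⟩
    exact ⟨⟨nm, hnm, hj⟩, hj ▸ hle⟩
  · rintro ⟨⟨nm, hnm, hj⟩, hle⟩
    exact ⟨nm, ⟨hnm, hj ▸ hle⟩, hj⟩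

theorem pv_pvLengths_sorted (L : Nat) (classes : List String) :
    (pvLengths L classes).Pairwise (fun a b => b ≤ a) :=
  PySem.List.sorted_pairwise_rev _ _

-- THE bridge: B's suffix-length scan equals A's max-by-len over the suffix filter
theorem pv_main_scan (t : List Char) (classes : List String) (key : String → List Char)
    (hk : ∀ nm, (key nm).length = nm.toList.length) :
    pvScan t classes key (pvLengths t.length classes)
      = PySem.List.max? (classes.filter (fun nm => (key nm).isSuffixOf t))
          (fun nm => PySem.Str.len nm) := by
  rcases hM : PySem.List.max? (classes.filter (fun nm => (key nm).isSuffixOf t))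
      (fun nm => PySem.Str.len nm) with _ | m
  · -- no class is a suffix of t: every candidate level misses
    have hnil := (PySem.List.max?_eq_none_iff _ _).1 hM
    have hall : ∀ nm ∈ classes, ¬ ((key nm).isSuffixOf t = true) := by
      intro nm hnm hsf
      have : nm ∈ classes.filter (fun nm => (key nm).isSuffixOf t) :=
        List.mem_filter.2 ⟨hnm, hsf⟩
      simp [hnil] at this
    apply pv_scan_none
    intro j _
    rw [List.find?_eq_none]
    intro nm hnm hbeq
    apply hall nm hnm
    have heq : key nm = t.drop (t.length - j) := by simpa using hbeq
    rw [heq, List.isSuffixOf_iff_suffix]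
    exact List.drop_suffix _ _
  · -- m is the leftmost longest suffix match; B finds it at level km = |m|
    have hmemE := PySem.List.max?_mem hM
    have hmax := PySem.List.max?_isMax hM
    obtain ⟨hmem, hsfm⟩ := List.mem_filter.1 hmemE
    have hsf : key m <:+ t := List.isSuffixOf_iff_suffix.1 hsfm
    have hlen : (key m).length ≤ t.length := List.IsSuffix.length_le hsf
    have hdrop : key m = t.drop (t.length - (key m).length) :=
      List.suffix_iff_eq_drop.mp hsf
    set km := (key m).length with hkm
    -- the find? at level km over classes returns m
    have hfindm : classes.find? (fun nm => key nm == t.drop (t.length - km)) = some m := by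
      have h1 := pv_max?_eq_find? (fun nm => PySem.Str.len nm) _ m hM
      rw [List.find?_filter] at h1
      rw [← h1]
      apply pv_find?_congr
      intro nm hnm
      rw [Bool.eq_iff_iff]
      simp only [decide_eq_true_eq, beq_iff_eq, List.isSuffixOf_iff_suffix,
        PySem.Str.len_eq, Nat.cast_le]
      constructor
      · intro heq
        have hlnm : (key nm).length = km := by
          rw [heq]
          simp
          omega
        constructor
        · rw [heq]
          exact List.drop_suffix _ _
        · have := hk nm
          have := hk m
          omega
      · rintro ⟨hs, hle⟩
        have hnmE : nm ∈ classes.filter (fun nm => (key nm).isSuffixOf t) :=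
          List.mem_filter.2 ⟨hnm, List.isSuffixOf_iff_suffix.2 hs⟩
        have hge := hmax nm hnmE
        simp only [PySem.Str.len_eq, Nat.cast_le] at hge
        have hlnm : nm.toList.length = m.toList.length := by omega
        have : key nm = t.drop (t.length - (key nm).length) :=
          List.suffix_iff_eq_drop.mp hs
        rwa [hk nm, hlnm, ← hk m] at this
    -- km is a candidate level
    have hkmem : km ∈ pvLengths t.length classes := by
      rw [pv_mem_pvLengths]
      refine ⟨⟨m, hmem, ?_⟩, ?_⟩
      · rw [← hk m]
      · omega
    -- every candidate level strictly above km misses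
    have hnone : ∀ j ∈ pvLengths t.length classes, km < j →
        classes.find? (fun nm => key nm == t.drop (t.length - j)) = none := by
      intro j hjmem hj
      have hjle : j ≤ t.length := ((pv_mem_pvLengths _ _ _).1 hjmem).2
      rw [List.find?_eq_none]
      intro nm hnm hbeq
      have heq : key nm = t.drop (t.length - j) := by simpa using hbeq
      have hlj : (key nm).length = j := by
        rw [heq]
        simp
        omega
      have hs : (key nm).isSuffixOf t = true := by
        rw [List.isSuffixOf_iff_suffix, heq]
        exact List.drop_suffix _ _
      have hnmE : nm ∈ classes.filter (fun nm => (key nm).isSuffixOf t) :=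
        List.mem_filter.2 ⟨hnm, hs⟩
      have hge := hmax nm hnmE
      simp only [PySem.Str.len_eq, Nat.cast_le] at hge
      have := hk nm
      have := hk m
      omega
    exact pv_scan_found t classes key km hfindm _ (pv_pvLengths_sorted _ _) hkmem hnone

theorem pv_main (raw_name : String) (known_classes : Option (List String)) :
    match_header_class_name_py raw_name known_classes
      = match_header_class_name_py_alt raw_name known_classes := by
  unfold match_header_class_name_py match_header_class_name_py_alt pvLongestSuffixClass
  have hkE : ∀ nm : String, nm.toList.length = nm.toList.length := fun _ => rfl
  have hkF : ∀ nm : String, (PySem.Chars.lower nm.toList).length = nm.toList.length := by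
    intro nm
    simp [PySem.Chars.lower]
  cases known_classes with
  | none =>
    simp only [Option.getD]
    rw [pv_main_scan raw_name.toList [] _ hkE,
        pv_main_scan (PySem.Chars.lower raw_name.toList) [] _ hkF]
    rfl
  | some kcs =>
    simp only [Option.getD]
    rw [pv_main_scan raw_name.toList kcs _ hkE,
        pv_main_scan (PySem.Chars.lower raw_name.toList) kcs _ hkF]
    simp only [PySem.Str.endswith, PySem.Chars.endswith, PySem.Str.toList_lower]
    cases kcs with
    | nil => rfl
    | cons x xs =>
      simp only [List.isEmpty_cons, Bool.false_eq_true, if_false]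
      rcases hme : PySem.List.max?
          ((x :: xs).filter (fun nm => nm.toList.isSuffixOf raw_name.toList))
          (fun nm => PySem.Str.len nm) with _ | m
      · have hnil := (PySem.List.max?_eq_none_iff _ _).1 hme
        rw [hnil]
        simp only [List.isEmpty_nil, Bool.not_true, Bool.false_eq_true, if_false]
        rcases hmf : PySem.List.max?
            ((x :: xs).filter (fun nm => (PySem.Chars.lower nm.toList).isSuffixOf (PySem.Chars.lower raw_name.toList)))
            (fun nm => PySem.Str.len nm) with _ | m
        · have hnilf := (PySem.List.max?_eq_none_iff _ _).1 hmf
          rw [hnilf]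
          rfl
        · have hne : ((x :: xs).filter (fun nm => (PySem.Chars.lower nm.toList).isSuffixOf (PySem.Chars.lower raw_name.toList))).isEmpty = false := by
            rcases hfe : (x :: xs).filter (fun nm => (PySem.Chars.lower nm.toList).isSuffixOf (PySem.Chars.lower raw_name.toList)) with _ | ⟨y, ys⟩
            · rw [hfe] at hmf; simp [PySem.List.max?] at hmf
            · rw [hfe]; rfl
          rw [hne, hmf]
          rfl
      · have hne : ((x :: xs).filter (fun nm => nm.toList.isSuffixOf raw_name.toList)).isEmpty = false := by
          rcases hfe : (x :: xs).filter (fun nm => nm.toList.isSuffixOf raw_name.toList) with _ | ⟨y, ys⟩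
          · rw [hfe] at hme; simp [PySem.List.max?] at hme
          · rw [hfe]; rfl
        rw [hne, hme]
        rfl

-- ===== VERDICT (by name: the statement is the Claim_ definition above) =====
theorem match_header_class_name_py_spec : Claim_equal_match_header_class_name_py := by
  intro raw_name known_classes _
  unfold Spec_match_header_class_name_py
  exact pv_main raw_name known_classes
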